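-- pv_equiv track=rewrite | github.com/CHIANGEL/Agora-Opt | code/Agora-Opt/src/debate_memory/config.py | normalize_dataset_name
-- ===== SOURCE A (Python) =====
-- DATASETS = [
--     "ComplexLP",
--     "EasyLP",
--     "IndustryOR",
--     "NL4OPT",
--     "NLP4LP",
--     "ReSocratic",
--     "ComplexOR",
--     "OPT-Principled",
-- ]
--
-- DATASET_ALIASES = {
--     "complexlp_clean": "ComplexLP",
--     "easylp_clean": "EasyLP",
--     "industryor_clean": "IndustryOR",
--     "industryor_v2": "IndustryOR",
--     "industryor_fixedv2": "IndustryOR",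
--     "industryor_fixedv2_clean": "IndustryOR",
--     "nl4opt": "NL4OPT",
--     "nl4opt_clean": "NL4OPT",
--     "nlp4lp_clean": "NLP4LP",
--     "complexor_clean": "ComplexOR",
--     "resocratic_clean": "ReSocratic",
--     "combined": "OPT-Principled",
--     "combined_dataset": "OPT-Principled",
--     "opt-principled_clean": "OPT-Principled",
-- }
--
-- def normalize_dataset_name(dataset_name: str) -> str:
--     """Map historical dataset names to the canonical OPEN benchmark names."""
--     if not dataset_name:
--         return dataset_name
--
--     name = dataset_name.strip()
--     if name.endswith(".jsonl"):
--         name = name[:-6]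
--
--     alias = DATASET_ALIASES.get(name.casefold())
--     if alias:
--         return alias
--
--     for canonical_name in DATASETS:
--         if canonical_name.casefold() == name.casefold():
--             return canonical_name
--
--     if name.endswith("_clean"):
--         base_name = name[:-6]
--         for canonical_name in DATASETS:
--             if canonical_name.casefold() == base_name.casefold():
--                 return canonical_name
--
--     return name
-- ===== SOURCE B (Python) =====
-- DATASETS = [
--     "ComplexLP",
--     "EasyLP",
--     "IndustryOR",
--     "NL4OPT",
--     "NLP4LP",
--     "ReSocratic",
--     "ComplexOR",
--     "OPT-Principled",
-- ]
--
-- DATASET_ALIASES = {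
--     "complexlp_clean": "ComplexLP",
--     "easylp_clean": "EasyLP",
--     "industryor_clean": "IndustryOR",
--     "industryor_v2": "IndustryOR",
--     "industryor_fixedv2": "IndustryOR",
--     "industryor_fixedv2_clean": "IndustryOR",
--     "nl4opt": "NL4OPT",
--     "nl4opt_clean": "NL4OPT",
--     "nlp4lp_clean": "NLP4LP",
--     "complexor_clean": "ComplexOR",
--     "resocratic_clean": "ReSocratic",
--     "combined": "OPT-Principled",
--     "combined_dataset": "OPT-Principled",
--     "opt-principled_clean": "OPT-Principled",
-- }
--
-- # One lookup table built once: canonical names, their '_clean' variants, and the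
-- # historical aliases (aliases last, so they take precedence on any collision).
-- _LOOKUP = {
--     **{c.casefold(): c for c in DATASETS},
--     **{c.casefold() + "_clean": c for c in DATASETS},
--     **DATASET_ALIASES,
-- }
--
-- def normalize_dataset_name(dataset_name: str) -> str:
--     """Map historical dataset names to the canonical OPEN benchmark names."""
--     if not dataset_name:
--         return dataset_name
--     name = dataset_name.strip()
--     if name.endswith(".jsonl"):
--         name = name[:-6]
--     return _LOOKUP.get(name.casefold(), name)
-- ===== Notes on version B (the rewrite author's own statement) =====
-- stated objective: simpler
-- what changed: Replaces A's cascade (alias dict lookup, then a linear scan of DATASETS, then a '_clean'-suffix branch with a second scan) by a single lookup in one precomputed table that merges canonical names, their '_clean' variants and the aliases.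
import Mathlib
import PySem

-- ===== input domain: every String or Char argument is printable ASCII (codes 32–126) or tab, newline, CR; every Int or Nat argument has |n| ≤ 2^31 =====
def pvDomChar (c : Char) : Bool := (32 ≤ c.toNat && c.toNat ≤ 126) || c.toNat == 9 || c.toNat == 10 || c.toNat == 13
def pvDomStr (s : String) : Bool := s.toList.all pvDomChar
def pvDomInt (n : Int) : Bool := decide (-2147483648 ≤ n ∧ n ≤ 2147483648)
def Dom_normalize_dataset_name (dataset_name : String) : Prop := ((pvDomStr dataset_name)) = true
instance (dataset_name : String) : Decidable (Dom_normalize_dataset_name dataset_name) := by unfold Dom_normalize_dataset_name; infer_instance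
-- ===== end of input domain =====

-- B replaces A's alias lookup + two linear scans + '_clean' branch by a single lookup in one
-- precomputed table (objective: simpler).
-- Note on the port: str.casefold() is ported as ASCII lowercasing (PySem.Chars.lower), exact on
-- the stated ASCII domain; dict keys are held as List Char (the strings' code points).

-- ===== PORT A =====
def pvDATASETS : List String :=
  ["ComplexLP", "EasyLP", "IndustryOR", "NL4OPT", "NLP4LP", "ReSocratic", "ComplexOR",
   "OPT-Principled"]

def pvDATASET_ALIASES : PySem.Dict (List Char) String := PySem.Dict.ofList
  [("complexlp_clean".toList, "ComplexLP"),
   ("easylp_clean".toList, "EasyLP"),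
   ("industryor_clean".toList, "IndustryOR"),
   ("industryor_v2".toList, "IndustryOR"),
   ("industryor_fixedv2".toList, "IndustryOR"),
   ("industryor_fixedv2_clean".toList, "IndustryOR"),
   ("nl4opt".toList, "NL4OPT"),
   ("nl4opt_clean".toList, "NL4OPT"),
   ("nlp4lp_clean".toList, "NLP4LP"),
   ("complexor_clean".toList, "ComplexOR"),
   ("resocratic_clean".toList, "ReSocratic"),
   ("combined".toList, "OPT-Principled"),
   ("combined_dataset".toList, "OPT-Principled"),
   ("opt-principled_clean".toList, "OPT-Principled")]

def normalize_dataset_name (dataset_name : String) : String :=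
  if dataset_name == "" then dataset_name
  else
    let name0 := PySem.Str.strip dataset_name
    let name := if PySem.Str.endswith name0 ".jsonl" then PySem.Str.slice name0 none (some (-6))
                else name0
    -- 'alias = DATASET_ALIASES.get(...); if alias:' — every alias value is a nonempty string,
    -- so 'if alias' is exactly 'found in the dict'
    match pvDATASET_ALIASES.get? (PySem.Chars.lower name.toList) with
    | some a => a
    | none =>
      match pvDATASETS.find? (fun c => PySem.Chars.lower c.toList == PySem.Chars.lower name.toList) with
      | some c => c
      | none =>
        if PySem.Str.endswith name "_clean" then
          match pvDATASETS.find? (fun c => PySem.Chars.lower c.toList ==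
                  PySem.Chars.lower (PySem.Str.slice name none (some (-6))).toList) with
          | some c => c
          | none => name
        else name

-- ===== PORT B =====
-- the module-level table _LOOKUP of Source B: canonical names, their '_clean' variants, then the
-- historical aliases merged last (overwrite keeps position; new keys append)
def pvLOOKUP : PySem.Dict (List Char) String :=
  let d := pvDATASETS.foldl (fun d c => d.insert (PySem.Chars.lower c.toList) c) PySem.Dict.empty
  let d := pvDATASETS.foldl
    (fun d c => d.insert (PySem.Chars.lower c.toList ++ "_clean".toList) c) d
  pvDATASET_ALIASES.items.foldl (fun d kv => d.insert kv.1 kv.2) d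

def normalize_dataset_name_alt (dataset_name : String) : String :=
  if dataset_name == "" then dataset_name
  else
    let name0 := PySem.Str.strip dataset_name
    let name := if PySem.Str.endswith name0 ".jsonl" then PySem.Str.slice name0 none (some (-6))
                else name0
    pvLOOKUP.getD (PySem.Chars.lower name.toList) name

-- ===== PRECONDITION & SPEC =====
def Spec_normalize_dataset_name (dataset_name : String) (out : String) : Prop := out = normalize_dataset_name_alt dataset_name
instance (dataset_name : String) (out : String) : Decidable (Spec_normalize_dataset_name dataset_name out) := by unfold Spec_normalize_dataset_name; infer_instance

-- ===== CLAIM (what is proved, stated in full; the proofs are below) =====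
def Claim_equal_normalize_dataset_name : Prop := ∀ (dataset_name : String), Dom_normalize_dataset_name dataset_name → Spec_normalize_dataset_name dataset_name (normalize_dataset_name dataset_name)

-- ===== LEMMAS AND PROOFS =====

-- the keys of pvLOOKUP, in insertion order
def pvKEYS : List (List Char) :=
  ["complexlp".toList, "easylp".toList, "industryor".toList, "nl4opt".toList, "nlp4lp".toList,
   "resocratic".toList, "complexor".toList, "opt-principled".toList,
   "complexlp_clean".toList, "easylp_clean".toList, "industryor_clean".toList,
   "nl4opt_clean".toList, "nlp4lp_clean".toList, "resocratic_clean".toList,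
   "complexor_clean".toList, "opt-principled_clean".toList,
   "industryor_v2".toList, "industryor_fixedv2".toList, "industryor_fixedv2_clean".toList,
   "combined".toList, "combined_dataset".toList]

lemma pvLOOKUP_keys : pvLOOKUP.keys = pvKEYS := by decide

-- the table lookup is: alias lookup, else first canonical name whose lowercase is the key
lemma pv_lookup_split (k : List Char) :
    pvLOOKUP.get? k =
      (pvDATASET_ALIASES.get? k).or
        (pvDATASETS.find? (fun c => PySem.Chars.lower c.toList == k)) := by
  by_cases hk : k ∈ pvKEYS
  · simp only [pvKEYS, List.mem_cons, List.not_mem_nil, or_false] at hk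
    rcases hk with rfl | rfl | rfl | rfl | rfl | rfl | rfl | rfl | rfl | rfl | rfl | rfl | rfl |
      rfl | rfl | rfl | rfl | rfl | rfl | rfl | rfl <;> decide
  · have hL : pvLOOKUP.get? k = none := by
      rw [PySem.Dict.get?_eq_none_iff_not_mem_keys, pvLOOKUP_keys]; exact hk
    have hA : pvDATASET_ALIASES.get? k = none := by
      rw [PySem.Dict.get?_eq_none_iff_not_mem_keys]
      have hsub : ∀ x ∈ pvDATASET_ALIASES.keys, x ∈ pvKEYS := by decide
      exact fun hm => hk (hsub k hm)
    have hF : pvDATASETS.find? (fun c => PySem.Chars.lower c.toList == k) = none := by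
      rw [List.find?_eq_none]
      intro c hc hp
      have hsub : ∀ c ∈ pvDATASETS, PySem.Chars.lower c.toList ∈ pvKEYS := by decide
      exact hk (beq_iff_eq.mp hp ▸ hsub c hc)
    rw [hL, hA, hF]; rfl

-- the '_clean' fallback of A never fires: if name ends in '_clean' and its base is a canonical
-- name (case-insensitively), then lower(name) is already an alias key
lemma pv_clean_branch_dead (name : String)
    (ha : pvDATASET_ALIASES.get? (PySem.Chars.lower name.toList) = none)
    (he : PySem.Str.endswith name "_clean" = true) :
    pvDATASETS.find? (fun c => PySem.Chars.lower c.toList ==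
      PySem.Chars.lower (PySem.Str.slice name none (some (-6))).toList) = none := by
  rw [List.find?_eq_none]
  intro c hc hp
  obtain ⟨pre, hpre⟩ : ∃ pre, name.toList = pre ++ "_clean".toList := by
    rw [PySem.Str.endswith_eq, PySem.Chars.endswith_iff] at he
    obtain ⟨pre, hpre⟩ := he
    exact ⟨pre, hpre.symm⟩
  have hbase : (PySem.Str.slice name none (some (-6))).toList = pre := by
    rw [PySem.Str.toList_slice, PySem.Chars.slice_eq_listSlice,
      PySem.List.slice_to_neg_ofNat name.toList 6 (by omega), hpre]
    exact List.take_left' (by simp)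
  have hkey : PySem.Chars.lower name.toList =
      PySem.Chars.lower c.toList ++ "_clean".toList := by
    rw [hpre, PySem.Chars.lower, List.map_append]
    have h1 : List.map PySem.Chars.lowerChar "_clean".toList = "_clean".toList := by decide
    have h2 : List.map PySem.Chars.lowerChar pre = PySem.Chars.lower c.toList := by
      rw [← PySem.Chars.lower, ← hbase]
      exact (beq_iff_eq.mp hp).symm
    rw [h1, h2]
  rw [PySem.Dict.get?_eq_none_iff_not_mem_keys] at ha
  have hsub : ∀ c ∈ pvDATASETS,
      PySem.Chars.lower c.toList ++ "_clean".toList ∈ pvDATASET_ALIASES.keys := by decide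
  exact ha (hkey ▸ hsub c hc)

-- A's whole post-strip cascade equals B's single table lookup
lemma pv_tail_eq (name : String) :
    (match pvDATASET_ALIASES.get? (PySem.Chars.lower name.toList) with
     | some a => a
     | none =>
       match pvDATASETS.find? (fun c => PySem.Chars.lower c.toList == PySem.Chars.lower name.toList) with
       | some c => c
       | none =>
         if PySem.Str.endswith name "_clean" then
           match pvDATASETS.find? (fun c => PySem.Chars.lower c.toList ==
                   PySem.Chars.lower (PySem.Str.slice name none (some (-6))).toList) with
           | some c => c
           | none => name
         else name) =
    pvLOOKUP.getD (PySem.Chars.lower name.toList) name := by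
  rw [PySem.Dict.getD_eq_get?_getD, pv_lookup_split]
  cases ha : pvDATASET_ALIASES.get? (PySem.Chars.lower name.toList) with
  | some v => rfl
  | none =>
    cases hf : pvDATASETS.find? (fun c => PySem.Chars.lower c.toList == PySem.Chars.lower name.toList) with
    | some c => rfl
    | none =>
      simp only [Option.or, Option.getD]
      by_cases he : PySem.Str.endswith name "_clean" = true
      · rw [if_pos he, pv_clean_branch_dead name ha he]
      · rw [if_neg he]

-- ===== VERDICT (by name: the statement is the Claim_ definition above) =====
set_option maxHeartbeats 1000000 in
theorem normalize_dataset_name_spec : Claim_equal_normalize_dataset_name := by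
  intro dataset_name _
  unfold Spec_normalize_dataset_name normalize_dataset_name normalize_dataset_name_alt
  by_cases h : (dataset_name == "") = true
  · rw [if_pos h, if_pos h]
  · rw [if_neg h, if_neg h]
    simp only []
    generalize (if PySem.Str.endswith (PySem.Str.strip dataset_name) ".jsonl" then
      PySem.Str.slice (PySem.Str.strip dataset_name) none (some (-6))
      else PySem.Str.strip dataset_name) = nm
    exact pv_tail_eq nm
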